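-- pv_equiv track=rewrite | github.com/nadflop/introduction-to-ai | hw1_programming/hw1_submission.py | mutateSentences
-- ===== SOURCE A (Python) =====
-- def mutateSentences(sentence):
--     """
--     Given a sentence (sequence of words), return a list of all "similar"
--     sentences.
--     We define a sentence to be similar to the original sentence if
--       - it as the same number of words, and
--       - each pair of adjacent words in the new sentence also occurs in the original sentence
--         (the words within each pair should appear in the same order in the output sentence
--          as they did in the original sentence.)
--     Notes:
--       - The order of the sentences you output doesn't matter.
--       - You must not output duplicates.
--       - Your generated sentence can use a word in the original sentence more than
--         once.
--     Example:
--       - Input: 'the cat and the mouse'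
--       - Output: ['and the cat and the', 'the cat and the mouse', 'the cat and the cat', 'cat and the cat and']
--                 (reordered versions of this list are allowed)
--     """
--     # BEGIN_YOUR_CODE (our solution is 21 lines of code, but don't worry if you deviate from this)
--     sentence = sentence.split(' ')
--     words = dict()
--
--     for i in range(0, len(sentence) - 1):
--         if words.get(sentence[i]) is None:
--             words[sentence[i]] = set()
--         words[sentence[i]].add(sentence[i+1])
--
--     def pair(result, sequence):
--         if len(sequence) == len(sentence):
--             result.add(' '.join(sequence))
--             return
--         if words.get(sequence[-1]) is None:
--             return
--         for value in words.get(sequence[-1]):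
--             sequence.append(value)
--             pair(result, sequence)
--             sequence.pop()
--         return
--
--     result = set()
--     for key in words.keys():
--         pair(result, [key])
--
--     return list(result)
-- ===== SOURCE B (Python) =====
-- def mutateSentences(sentence):
--     words_list = sentence.split(' ')
--     n = len(words_list)
--     # successor map: word -> list of distinct next-words in first-occurrence order
--     succ = {}
--     for a, b in zip(words_list, words_list[1:]):
--         bucket = succ.setdefault(a, [])
--         if b not in bucket:
--             bucket.append(b)
--     # breadth-first frontier of partial sequences, seeded by the adjacency keys
--     frontier = [[k] for k in succ]
--     for _ in range(n - 1):
--         frontier = [seq + [v] for seq in frontier for v in succ.get(seq[-1], [])]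
--     # join and deduplicate, keeping first-completion order
--     seen = set()
--     result = []
--     for seq in frontier:
--         s = ' '.join(seq)
--         if s not in seen:
--             seen.add(s)
--             result.append(s)
--     return result
-- ===== Notes on version B (the rewrite author's own statement) =====
-- stated objective: alternative
-- what changed: Replaces A's recursive backtracking DFS (mutable sequence with append/pop and a recursive helper) by an iterative breadth-first frontier: seed one singleton per adjacency key, extend every sequence by its successors n-1 times, then join and deduplicate in one final pass; the successor map is a dict of ordered lists instead of a dict of sets, so the output order is deterministic rather than hash-dependent.
import Mathlib
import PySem

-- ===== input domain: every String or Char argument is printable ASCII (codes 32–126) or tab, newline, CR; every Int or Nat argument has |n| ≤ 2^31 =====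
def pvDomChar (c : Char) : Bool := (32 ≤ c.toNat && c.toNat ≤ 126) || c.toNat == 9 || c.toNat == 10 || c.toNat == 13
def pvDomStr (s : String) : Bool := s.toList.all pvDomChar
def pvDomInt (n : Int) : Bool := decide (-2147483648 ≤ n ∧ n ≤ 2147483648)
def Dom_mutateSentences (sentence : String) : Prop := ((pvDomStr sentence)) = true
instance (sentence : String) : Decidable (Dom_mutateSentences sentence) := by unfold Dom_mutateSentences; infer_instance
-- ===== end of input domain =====

-- B replaces A's recursive backtracking DFS by an iterative breadth-first frontier with a final
-- one-pass deduplication (objective: alternative decomposition, similar cost). Python A returns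
-- list(set(...)), whose order is CPython hash order; both ports emit the first-completion order,
-- and the result is compared as a set.

-- ===== PORT A =====
-- words dict: for i in range(0, len(sentence)-1): setdefault-then-add of sentence[i+1] under sentence[i].
-- Indices i, i+1 are always in range, so the pyGetD default "" is never used.
def buildWordsA (s : List String) : PySem.Dict String (PySem.Set String) :=
  (PySem.List.pyRange 0 ((s.length : Int) - 1)).foldl
    (fun d i =>
      let wi := PySem.List.pyGetD s i ""
      let wn := PySem.List.pyGetD s (i + 1) ""
      let d := if (d.get? wi).isNone then d.insert wi PySem.Set.empty else d
      d.modify wi PySem.Set.empty (fun st => PySem.Set.add st wn))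
    PySem.Dict.empty

-- the recursive helper 'pair'; fuel = n - len(sequence) steps remain (the length-equality test is
-- A's own stopping test; fuel only justifies termination and is never exhausted on real calls).
-- Python iterates 'for value in words.get(...)', a set, whose hash order is not modelled: the port
-- iterates it in first-insertion order; the returned set is the same.
def pairA (words : PySem.Dict String (PySem.Set String)) (n : Nat) :
    Nat → PySem.Set String → List String → PySem.Set String
  | fuel, result, seq =>
    if seq.length = n then PySem.Set.add result (PySem.Str.join " " seq)
    else
      match fuel with
      | 0 => result
      | fuel + 1 =>
        match words.get? (PySem.List.pyGetD seq (-1) "") with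
        | none => result
        | some vs => vs.foldl (fun r v => pairA words n fuel r (seq ++ [v])) result

-- 'sentence.split(' ')' never yields an empty list, so seq[-1] above never raises.
-- 'list(result)': the result set in first-insertion order (hash order is not modelled; set-equal).
def mutateSentences (sentence : String) : List String :=
  let s := (PySem.Str.split? sentence " ").getD []   -- separator ≠ "", so split? is always some
  let words := buildWordsA s
  words.keys.foldl (fun r k => pairA words s.length (s.length - 1) r [k]) PySem.Set.empty

-- ===== PORT B =====
-- successor dict of ordered lists: bucket = succ.setdefault(a, []); if b not in bucket: bucket.append(b)
def buildSuccB (ws : List String) : PySem.Dict String (List String) :=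
  (ws.zip ws.tail).foldl
    (fun d ab =>
      let bucket := d.getD ab.1 []
      let d := d.setdefault ab.1 []
      if bucket.contains ab.2 then d else d.insert ab.1 (bucket ++ [ab.2]))
    PySem.Dict.empty

def mutateSentences_alt (sentence : String) : List String :=
  let ws := (PySem.Str.split? sentence " ").getD []   -- separator ≠ "", so split? is always some
  let n := ws.length
  let succ := buildSuccB ws
  let frontier0 := succ.keys.map (fun k => [k])
  let frontier := (PySem.List.pyRange 0 ((n : Int) - 1)).foldl
    (fun fr _ => fr.flatMap (fun seq =>
      (succ.getD (PySem.List.pyGetD seq (-1) "") []).map (fun v => seq ++ [v])))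
    frontier0
  (frontier.foldl
    (fun (st : List String × PySem.Set String) seq =>
      let s := PySem.Str.join " " seq
      if PySem.Set.contains st.2 s then st else (st.1 ++ [s], PySem.Set.add st.2 s))
    ([], PySem.Set.empty)).1

-- ===== PRECONDITION & SPEC =====
def Spec_mutateSentences (sentence : String) (out : List String) : Prop := out = mutateSentences_alt sentence
instance (sentence : String) (out : List String) : Decidable (Spec_mutateSentences sentence out) := by unfold Spec_mutateSentences; infer_instance

-- ===== CLAIM (what is proved, stated in full; the proofs are below) =====
def Claim_equal_mutateSentences : Prop := ∀ (sentence : String), Dom_mutateSentences sentence → Spec_mutateSentences sentence (mutateSentences sentence)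

-- ===== LEMMAS AND PROOFS =====

def dfsL (d : PySem.Dict String (PySem.Set String)) (n : Nat) :
    Nat → List String → List (List String)
  | fuel, seq =>
    if seq.length = n then [seq]
    else
      match fuel with
      | 0 => []
      | fuel + 1 =>
        match d.get? (PySem.List.pyGetD seq (-1) "") with
        | none => []
        | some vs => vs.flatMap (fun v => dfsL d n fuel (seq ++ [v]))

def growB (d : PySem.Dict String (List String)) : Nat → List String → List (List String)
  | 0, seq => [seq]
  | m + 1, seq =>
      (d.getD (PySem.List.pyGetD seq (-1) "") []).flatMap (fun v => growB d m (seq ++ [v]))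

theorem dfsL_eq_growB (d : PySem.Dict String (PySem.Set String)) (n : Nat) :
    ∀ (m : Nat) (seq : List String), seq.length + m = n →
      dfsL d n m seq = growB d m seq := by
  intro m
  induction m with
  | zero => intro seq h; simp at h; simp [dfsL, growB, h]
  | succ m ih =>
    intro seq h
    have hne : seq.length ≠ n := by omega
    rw [dfsL, growB, if_neg hne, PySem.Dict.getD_eq_get?_getD]
    cases hg : d.get? (PySem.List.pyGetD seq (-1) "") with
    | none => simp
    | some vs =>
      simp only [Option.getD_some]
      apply List.flatMap_congr
      intro v hv
      apply ih
      simp; omega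

theorem bfs_foldl_eq (d : PySem.Dict String (List String)) :
    ∀ (m : Nat) (fr : List (List String)),
      (List.range m).foldl
        (fun fr _ => fr.flatMap (fun seq =>
          (d.getD (PySem.List.pyGetD seq (-1) "") []).map (fun v => seq ++ [v]))) fr
      = fr.flatMap (growB d m) := by
  intro m
  induction m with
  | zero => intro fr; simp [growB]
  | succ m ih =>
    intro fr
    rw [List.range_succ_eq_map, List.foldl_cons, List.foldl_map, ih]
    rw [List.flatMap_assoc]
    apply List.flatMap_congr
    intro seq _
    rw [List.flatMap_map]
    rfl

theorem dedup_fold_eq :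
    ∀ (l : List (List String)) (acc : PySem.Set String),
      (l.foldl
        (fun (st : List String × PySem.Set String) seq =>
          if PySem.Set.contains st.2 (PySem.Str.join " " seq) then st
          else (st.1 ++ [PySem.Str.join " " seq], PySem.Set.add st.2 (PySem.Str.join " " seq)))
        (acc, acc)).1
      = (l.map (PySem.Str.join " ")).foldl PySem.Set.add acc := by
  intro l
  induction l with
  | nil => intro acc; simp
  | cons seq t ih =>
    intro acc
    simp only [List.foldl_cons, List.map_cons]
    by_cases h : PySem.Set.contains acc (PySem.Str.join " " seq) = true
    · rw [if_pos h]
      have : PySem.Set.add acc (PySem.Str.join " " seq) = acc := by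
        simp [PySem.Set.add]
        simpa [PySem.Set.contains] using h
      rw [this]; exact ih acc
    · rw [if_neg h]
      have hadd : PySem.Set.add acc (PySem.Str.join " " seq) = acc ++ [PySem.Str.join " " seq] := by
        simp only [PySem.Set.add, h, if_false, Bool.false_eq_true]
      rw [hadd]
      exact ih (acc ++ [PySem.Str.join " " seq])

theorem set_update_flatMap {α β : Type} [BEq α] (F : β → List α) :
    ∀ (l : List β) (r : PySem.Set α),
      l.foldl (fun r v => PySem.Set.update r (F v)) r = PySem.Set.update r (l.flatMap F) := by
  intro l
  induction l with
  | nil => intro r; simp [PySem.Set.update]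
  | cons x t ih => intro r; simp [PySem.Set.update, List.foldl_append] at *; simp [ih]

theorem pairA_eq_update (d : PySem.Dict String (PySem.Set String)) (n : Nat) :
    ∀ (fuel : Nat) (seq : List String) (r : PySem.Set String),
      pairA d n fuel r seq =
        PySem.Set.update r ((dfsL d n fuel seq).map (PySem.Str.join " ")) := by
  intro fuel
  induction fuel with
  | zero =>
    intro seq r
    rw [pairA, dfsL]
    by_cases h : seq.length = n
    · simp [h, PySem.Set.update]
    · simp [h, PySem.Set.update]
  | succ fuel ih =>
    intro seq r
    rw [pairA, dfsL]
    by_cases h : seq.length = n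
    · simp [h, PySem.Set.update]
    · rw [if_neg h, if_neg h]
      cases hg : d.get? (PySem.List.pyGetD seq (-1) "") with
      | none => simp [PySem.Set.update]
      | some vs =>
        rw [List.map_flatMap]
        rw [← set_update_flatMap (fun v => (dfsL d n fuel (seq ++ [v])).map (PySem.Str.join " ")) vs r]
        exact PySem.List.foldl_congr_mem vs _ _ r (fun r v _ => ih (seq ++ [v]) r)

theorem dict_insert_self (d : PySem.Dict String (List String)) (k : String) (v : List String)
    (hg : d.get? k = some v) (hnd : d.keys.Nodup) : d.insert k v = d := by
  have hc : d.contains k = true := by rw [PySem.Dict.contains_eq_isSome_get?, hg]; rfl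
  apply PySem.Dict.ext
  rw [PySem.Dict.items_insert_of_contains _ _ hc]
  have hcong : ∀ p ∈ d.items, (if (p.1 == k) = true then (k, v) else p) = id p := by
    intro p hp
    by_cases hpk : p.1 = k
    · have : d.get? p.1 = some p.2 := PySem.Dict.get?_of_mem_items d (by simpa using hp) hnd
      rw [hpk, hg] at this
      have hv : v = p.2 := Option.some_inj.mp this
      simp only [hpk, BEq.rfl, if_true, id]
      rw [hv, ← hpk]
    · simp [hpk]
  rw [List.map_congr_left hcong, List.map_id]

theorem pairs_eq (ws : List String) :
    (PySem.List.pyRange 0 ((ws.length : Int) - 1)).map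
      (fun i => (PySem.List.pyGetD ws i "", PySem.List.pyGetD ws (i + 1) ""))
    = ws.zip ws.tail := by
  cases ws with
  | nil => simp [PySem.List.pyRange]
  | cons w t =>
    have h1 : ((w :: t).length : Int) - 1 = ((t.length : Nat) : Int) := by simp
    rw [h1, PySem.List.pyRange_zero_natCast, List.map_map]
    apply List.ext_getElem
    · simp
    · intro i h1' h2'
      simp only [List.getElem_map, Function.comp_apply, List.getElem_zip] at *
      rw [List.getElem_range]
      have hi : i < t.length := by simpa using h1'
      rw [PySem.List.pyGetD_natCast]
      have : ((i : Int) + 1) = ((i + 1 : Nat) : Int) := by push_cast; ring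
      rw [this, PySem.List.pyGetD_natCast]
      have hlt1 : i < (w :: t).length := by simp; omega
      have hlt2 : i + 1 < (w :: t).length := by simp; omega
      rw [List.getD_eq_getElem _ _ hlt1, List.getD_eq_getElem _ _ hlt2]
      simp

def stepPA (d : PySem.Dict String (PySem.Set String)) (ab : String × String) :
    PySem.Dict String (PySem.Set String) :=
  let d := if (d.get? ab.1).isNone then d.insert ab.1 PySem.Set.empty else d
  d.modify ab.1 PySem.Set.empty (fun st => PySem.Set.add st ab.2)

def stepPB (d : PySem.Dict String (List String)) (ab : String × String) :
    PySem.Dict String (List String) :=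
  let bucket := d.getD ab.1 []
  let d := d.setdefault ab.1 []
  if bucket.contains ab.2 then d else d.insert ab.1 (bucket ++ [ab.2])

theorem stepP_eq (d : PySem.Dict String (List String)) (ab : String × String)
    (hnd : d.keys.Nodup) : stepPA d ab = stepPB d ab := by
  obtain ⟨a, b⟩ := ab
  cases hga : d.get? a with
  | none =>
    have hc : d.contains a = false := by
      rw [PySem.Dict.contains_eq_isSome_get?, hga]; rfl
    simp only [stepPA, stepPB, hga, Option.isNone_none, if_true,
      PySem.Dict.setdefault_of_not_contains _ _ hc, PySem.Dict.modify,
      PySem.Dict.getD_eq_get?_getD, PySem.Dict.get?_insert_self, Option.getD_some]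
    simp [PySem.Set.add, PySem.Set.empty, PySem.Dict.insert_insert_self]
  | some v =>
    have hc : d.contains a = true := by
      rw [PySem.Dict.contains_eq_isSome_get?, hga]; rfl
    simp only [stepPA, stepPB, hga, Option.isNone_some, Bool.false_eq_true, if_false,
      PySem.Dict.setdefault_of_contains _ _ hc, PySem.Dict.modify,
      PySem.Dict.getD_eq_get?_getD, Option.getD_some]
    cases hvb : v.contains b with
    | true =>
      simp only [PySem.Set.add, PySem.Set.contains, hvb, if_true]
      exact dict_insert_self d a v hga hnd
    | false =>
      have hbv : b ∉ v := by simpa using hvb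
      simp [PySem.Set.add, PySem.Set.contains, hbv]

theorem stepPB_keys (d : PySem.Dict String (List String)) (ab : String × String)
    (hnd : d.keys.Nodup) : (stepPB d ab).keys.Nodup := by
  obtain ⟨a, b⟩ := ab
  cases hc : d.contains a with
  | true =>
    have hk : (d.setdefault a []).keys = d.keys := by
      rw [PySem.Dict.keys_setdefault, if_pos hc]
    simp only [stepPB]
    by_cases hb : (d.getD a []).contains b = true
    · rw [if_pos (by simpa using hb), PySem.Dict.setdefault_of_contains _ _ hc]
      exact hnd
    · rw [if_neg hb, PySem.Dict.setdefault_of_contains _ _ hc,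
        PySem.Dict.keys_insert_of_contains _ _ hc]
      exact hnd
  | false =>
    have hmem : a ∉ d.keys := by
      intro hm
      rw [← PySem.Dict.contains_iff_mem_keys] at hm
      simp [hc] at hm
    simp only [stepPB]
    by_cases hb : (d.getD a []).contains b = true
    · rw [if_pos (by simpa using hb), PySem.Dict.keys_setdefault, if_neg (by simp [hc])]
      simp [List.nodup_append, hnd]
      exact fun x hx hxa => hmem (hxa ▸ hx)
    · rw [if_neg hb]
      have hc2 : (d.setdefault a []).contains a = true := by
        rw [PySem.Dict.setdefault_of_not_contains _ _ hc]
        exact PySem.Dict.contains_insert_self d a []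
      rw [PySem.Dict.keys_insert_of_contains _ _ hc2,
        PySem.Dict.keys_setdefault, if_neg (by simp [hc])]
      simp [List.nodup_append, hnd]
      exact fun x hx hxa => hmem (hxa ▸ hx)

theorem fold_inv {α : Type} (fA fB : PySem.Dict String (List String) → α → PySem.Dict String (List String))
    (hstep : ∀ d x, d.keys.Nodup → fA d x = fB d x)
    (hkeys : ∀ d x, d.keys.Nodup → (fB d x).keys.Nodup) :
    ∀ (l : List α) (d : PySem.Dict String (List String)), d.keys.Nodup →
      l.foldl fA d = l.foldl fB d := by
  intro l
  induction l with
  | nil => intro d _; rfl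
  | cons x t ih =>
    intro d hnd
    simp only [List.foldl_cons]
    rw [hstep d x hnd]
    exact ih (fB d x) (hkeys d x hnd)

theorem buildWords_eq (ws : List String) : buildWordsA ws = buildSuccB ws := by
  show (PySem.List.pyRange 0 ((ws.length : Int) - 1)).foldl
      (fun d i => stepPA d (PySem.List.pyGetD ws i "", PySem.List.pyGetD ws (i + 1) ""))
      PySem.Dict.empty
    = (ws.zip ws.tail).foldl stepPB PySem.Dict.empty
  rw [← List.foldl_map (f := fun i => (PySem.List.pyGetD ws i "", PySem.List.pyGetD ws (i + 1) ""))
        (g := stepPA), pairs_eq ws]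
  exact fold_inv stepPA stepPB stepP_eq stepPB_keys (ws.zip ws.tail) PySem.Dict.empty
    (by simp [PySem.Dict.empty, PySem.Dict.keys])

theorem ports_eq (sentence : String) : mutateSentences sentence = mutateSentences_alt sentence := by
  simp only [mutateSentences, mutateSentences_alt]
  rw [buildWords_eq]
  set ws := (PySem.Str.split? sentence " ").getD [] with hws
  set d := buildSuccB ws with hd
  by_cases hn : ws.length = 0
  · rw [List.length_eq_zero_iff] at hn
    rw [hn] at hd
    rw [hn, hd]
    decide
  · -- A side: fold of pairA = Set.update of the DFS lists
    rw [PySem.List.foldl_congr_mem d.keys _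
      (fun r k => PySem.Set.update r ((dfsL d ws.length (ws.length - 1) [k]).map (PySem.Str.join " ")))
      PySem.Set.empty
      (fun r k _ => pairA_eq_update d ws.length (ws.length - 1) [k] r)]
    rw [set_update_flatMap (fun k => (dfsL d ws.length (ws.length - 1) [k]).map (PySem.Str.join " "))]
    -- B side: range conversion, then BFS = flatMap of growB
    have hrange : ((ws.length : Int) - 1) = ((ws.length - 1 : Nat) : Int) := by omega
    rw [hrange, PySem.List.pyRange_zero_natCast,
      List.foldl_map, bfs_foldl_eq d (ws.length - 1) (d.keys.map (fun k => [k]))]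
    have hpair : (([] : List String), (PySem.Set.empty : PySem.Set String))
        = ((PySem.Set.empty : PySem.Set String), (PySem.Set.empty : PySem.Set String)) := rfl
    rw [hpair, dedup_fold_eq]
    rw [List.flatMap_map]
    -- align the two flatMaps
    have hgrow : ∀ k, dfsL d ws.length (ws.length - 1) [k] = growB d (ws.length - 1) [k] := by
      intro k
      apply dfsL_eq_growB
      simp; omega
    simp only [hgrow]
    rw [List.map_flatMap]
    rfl

-- ===== VERDICT (by name: the statement is the Claim_ definition above) =====
theorem mutateSentences_spec : Claim_equal_mutateSentences := by
  intro sentence _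
  exact ports_eq sentence
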